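-- pv_equiv track=rewrite | github.com/vagary24/CTFShow | 脚本/encode.py | common_otc
-- ===== SOURCE A (Python) =====
-- def get_oct(c):
--     # 假设这是你的自定义函数，用于获取字符的八进制表示
--     return oct(ord(c))[2:]
--
-- def common_otc(cmd):
--     payload = '$\''
--     for c in cmd:
--         if c == ' ':
--             payload += '\' $\''
--         else:
--             payload += '\\' + get_oct(c)
--     payload += '\''
--     return payload
-- ===== SOURCE B (Python) =====
-- def get_oct(c):
--     return oct(ord(c))[2:]
--
-- def common_otc(cmd):
--     body = "' $'".join(''.join('\\' + get_oct(c) for c in seg) for seg in cmd.split(' '))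
--     return "$'" + body + "'"
-- ===== Notes on version B (the rewrite author's own statement) =====
-- stated objective: simpler
-- what changed: Replaced A's char-by-char stateful loop with its space-branch by a segment-level decomposition: split on single spaces, octal-escape each segment, and join the segments with the quote separator.
import Mathlib
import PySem

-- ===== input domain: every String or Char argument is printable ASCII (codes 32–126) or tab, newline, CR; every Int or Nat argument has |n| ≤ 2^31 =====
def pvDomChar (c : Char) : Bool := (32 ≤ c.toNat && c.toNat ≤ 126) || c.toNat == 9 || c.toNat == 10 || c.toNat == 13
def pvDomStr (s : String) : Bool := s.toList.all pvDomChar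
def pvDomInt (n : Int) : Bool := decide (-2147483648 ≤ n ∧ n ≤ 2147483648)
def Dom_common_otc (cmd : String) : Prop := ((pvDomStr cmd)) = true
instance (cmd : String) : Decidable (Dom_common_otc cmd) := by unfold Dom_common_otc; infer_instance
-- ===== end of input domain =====

-- B replaces A's char-by-char stateful loop with split(' ') / per-segment escape / join (objective: simpler decomposition, same cost).

-- ===== PORT A =====
-- get_oct(c) = oct(ord(c))[2:] : the octal digits of ord(c), no prefix
def getOct (c : Char) : List Char := Nat.toDigits 8 c.toNat

def common_otc (cmd : String) : String :=
  String.mk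
    ((cmd.toList.foldl
        (fun payload c =>
          if c = ' ' then payload ++ ['\'', ' ', '$', '\'']
          else payload ++ '\\' :: getOct c)
        ['$', '\'']) ++ ['\''])

-- ===== PORT B =====
def escSeg (seg : List Char) : List Char := seg.flatMap (fun c => '\\' :: getOct c)

def common_otc_alt (cmd : String) : String :=
  String.mk
    ('$' :: '\'' ::
      PySem.Chars.join ['\'', ' ', '$', '\'']
        ((PySem.Chars.splitOn cmd.toList [' ']).map escSeg)
      ++ ['\''])

-- ===== PRECONDITION & SPEC =====
def Spec_common_otc (cmd : String) (out : String) : Prop := out = common_otc_alt cmd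
instance (cmd : String) (out : String) : Decidable (Spec_common_otc cmd out) := by unfold Spec_common_otc; infer_instance

-- ===== CLAIM (what is proved, stated in full; the proofs are below) =====
def Claim_equal_common_otc : Prop := ∀ (cmd : String), Dom_common_otc cmd → Spec_common_otc cmd (common_otc cmd)

-- ===== LEMMAS AND PROOFS =====

-- reference splitter for a single-space separator
def spSp : List Char → List (List Char)
  | [] => [[]]
  | c :: rest =>
    if c = ' ' then [] :: spSp rest
    else match spSp rest with
      | [] => [[c]]
      | h :: t => (c :: h) :: t

theorem spSp_ne_nil (cs : List Char) : spSp cs ≠ [] := by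
  cases cs with
  | nil => simp [spSp]
  | cons c rest =>
    simp only [spSp]
    split
    · simp
    · split <;> simp

-- prepend x onto the head of a list of segments
def preHead (x : List Char) : List (List Char) → List (List Char)
  | [] => [x]
  | h :: t => (x ++ h) :: t

theorem preHead_nil_of_ne_nil {l : List (List Char)} (h : l ≠ []) : preHead [] l = l := by
  cases l with
  | nil => exact absurd rfl h
  | cons a t => simp [preHead]

theorem preHead_preHead (x y : List Char) (l : List (List Char)) :
    preHead x (preHead y l) = preHead (x ++ y) l := by
  cases l <;> simp [preHead]

theorem splitOn_go_spec (fuel : Nat) :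
    ∀ (l cur : List Char) (acc : List (List Char)), l.length < fuel →
      PySem.Chars.splitOn.go [' '] fuel l cur acc =
        acc.reverse ++ preHead cur.reverse (spSp l) := by
  induction fuel with
  | zero => intro l cur acc h; exact absurd h (Nat.not_lt_zero _)
  | succ fuel ih =>
    intro l cur acc h
    cases l with
    | nil => simp [PySem.Chars.splitOn.go, spSp, preHead]
    | cons c rest =>
      by_cases hc : c = ' '
      · subst hc
        have hpre : List.isPrefixOf [' '] (' ' :: rest) = true := by
          simp [List.isPrefixOf]
        rw [PySem.Chars.splitOn.go]
        simp only [hpre, if_pos]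
        simp only [List.length_cons, List.length_nil, List.drop_succ_cons, List.drop_zero]
        rw [ih rest [] (cur.reverse :: acc) (by simpa using Nat.lt_of_succ_lt_succ h)]
        rw [show ([] : List Char).reverse = [] from rfl, preHead_nil_of_ne_nil (spSp_ne_nil rest)]
        simp [spSp, preHead]
      · have hpre : List.isPrefixOf [' '] (c :: rest) = false := by
          simp [List.isPrefixOf]
          intro h'; exact absurd h'.symm hc
        rw [PySem.Chars.splitOn.go]
        simp only [hpre, Bool.false_eq_true, if_false]
        rw [ih rest (c :: cur) acc (by simpa using Nat.lt_of_succ_lt_succ h)]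
        have hsp : spSp (c :: rest) = preHead [c] (spSp rest) := by
          simp only [spSp, hc, if_false]
          cases hr : spSp rest with
          | nil => simp [preHead]
          | cons a t => simp [preHead]
        rw [hsp, preHead_preHead]
        simp

theorem splitOn_space_eq (cs : List Char) :
    PySem.Chars.splitOn cs [' '] = spSp cs := by
  unfold PySem.Chars.splitOn
  rw [splitOn_go_spec (cs.length + 1) cs [] [] (by omega)]
  simpa using preHead_nil_of_ne_nil (spSp_ne_nil cs)

theorem intercalate_pair (sep a b : List Char) (t : List (List Char)) :
    List.intercalate sep (a :: b :: t) = a ++ sep ++ List.intercalate sep (b :: t) := by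
  simp [List.intercalate]

theorem intercalate_single (sep a : List Char) :
    List.intercalate sep [a] = a := by
  simp [List.intercalate]

theorem flatMap_eq_join (cs : List Char) :
    cs.flatMap (fun c => if c = ' ' then ['\'', ' ', '$', '\''] else '\\' :: getOct c) =
      PySem.Chars.join ['\'', ' ', '$', '\''] ((spSp cs).map escSeg) := by
  induction cs with
  | nil =>
    simp [spSp, escSeg, PySem.Chars.join, List.intercalate]
  | cons c rest ih =>
    obtain ⟨h, t, hr⟩ : ∃ h t, spSp rest = h :: t := by
      cases hsp : spSp rest with
      | nil => exact absurd hsp (spSp_ne_nil rest)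
      | cons a b => exact ⟨a, b, rfl⟩
    rw [hr] at ih
    by_cases hc : c = ' '
    · subst hc
      rw [show spSp (' ' :: rest) = [] :: spSp rest from by simp [spSp], hr]
      rw [List.flatMap_cons, if_pos rfl]
      unfold PySem.Chars.join at ih ⊢
      simp only [List.map_cons]
      rw [intercalate_pair, ih]
      simp [escSeg]
    · rw [show spSp (c :: rest) = (c :: h) :: t from by simp [spSp, hc, hr]]
      rw [List.flatMap_cons, if_neg hc]
      unfold PySem.Chars.join at ih ⊢
      simp only [List.map_cons] at ih ⊢
      have key : List.intercalate ['\'', ' ', '$', '\''] (escSeg (c :: h) :: List.map escSeg t) =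
          ('\\' :: getOct c) ++
            List.intercalate ['\'', ' ', '$', '\''] (escSeg h :: List.map escSeg t) := by
        cases t with
        | nil =>
          simp only [List.map_nil]
          rw [intercalate_single, intercalate_single]
          simp [escSeg]
        | cons b tt =>
          simp only [List.map_cons]
          rw [intercalate_pair, intercalate_pair]
          simp [escSeg]
      rw [key, ih]

theorem foldl_append_flatMap (g : Char → List Char) :
    ∀ (l : List Char) (acc : List Char),
      l.foldl (fun a x => a ++ g x) acc = acc ++ l.flatMap g := by
  intro l
  induction l with
  | nil => intro acc; simp
  | cons x xs ih => intro acc; simp [List.foldl_cons, ih]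

-- ===== VERDICT (by name: the statement is the Claim_ definition above) =====
theorem common_otc_spec : Claim_equal_common_otc := by
  intro cmd _
  unfold Spec_common_otc common_otc common_otc_alt
  have hfold :
      cmd.toList.foldl
        (fun payload c =>
          if c = ' ' then payload ++ ['\'', ' ', '$', '\'']
          else payload ++ '\\' :: getOct c)
        ['$', '\''] =
      ['$', '\''] ++ cmd.toList.flatMap
        (fun c => if c = ' ' then ['\'', ' ', '$', '\''] else '\\' :: getOct c) := by
    have : (fun (payload : List Char) (c : Char) =>
        if c = ' ' then payload ++ ['\'', ' ', '$', '\'']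
        else payload ++ '\\' :: getOct c) =
        fun payload c => payload ++
          (if c = ' ' then ['\'', ' ', '$', '\''] else '\\' :: getOct c) := by
      funext p c; split <;> rfl
    rw [this, foldl_append_flatMap]
  rw [hfold, splitOn_space_eq, flatMap_eq_join]
  rfl
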